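-- pv_equiv track=rewrite | github.com/BadDogSkyrim/Modding-Tools | Blender Scripts/nuke_copy_indices.py | buildDegreeOccuranceHeap
-- ===== SOURCE A (Python) =====
-- from operator import itemgetter
--
-- def buildDegreeOccuranceHeap(mesh, VertexFaces):
--     degreeMap = {}
--     for idx, f in enumerate(VertexFaces):
--         degree = len(f)
--         if not degree in degreeMap:
--             degreeMap[degree] = []
--         degreeMap[degree].append(idx)
--     occursHeap = []
--     for degree, vList in degreeMap.items():
--         occursHeap.append((len(vList), degree, vList))
--     occursHeap = sorted(occursHeap, key=itemgetter(0,1))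
--     return occursHeap
-- ===== SOURCE B (Python) =====
-- from operator import itemgetter
--
-- def buildDegreeOccuranceHeap(mesh, VertexFaces):
--     degrees = sorted(set(len(f) for f in VertexFaces))
--     heap = [(sum(1 for f in VertexFaces if len(f) == d), d,
--              [idx for idx, f in enumerate(VertexFaces) if len(f) == d])
--             for d in degrees]
--     return sorted(heap, key=itemgetter(0, 1))
-- ===== Notes on version B (the rewrite author's own statement) =====
-- stated objective: simpler
-- what changed: Replaces the dict-accumulation grouping with a direct per-degree construction: sort the distinct degrees, then build each (count, degree, indices) tuple by filtering, instead of hashing indices into a dict and reading it back out.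
import Mathlib
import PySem

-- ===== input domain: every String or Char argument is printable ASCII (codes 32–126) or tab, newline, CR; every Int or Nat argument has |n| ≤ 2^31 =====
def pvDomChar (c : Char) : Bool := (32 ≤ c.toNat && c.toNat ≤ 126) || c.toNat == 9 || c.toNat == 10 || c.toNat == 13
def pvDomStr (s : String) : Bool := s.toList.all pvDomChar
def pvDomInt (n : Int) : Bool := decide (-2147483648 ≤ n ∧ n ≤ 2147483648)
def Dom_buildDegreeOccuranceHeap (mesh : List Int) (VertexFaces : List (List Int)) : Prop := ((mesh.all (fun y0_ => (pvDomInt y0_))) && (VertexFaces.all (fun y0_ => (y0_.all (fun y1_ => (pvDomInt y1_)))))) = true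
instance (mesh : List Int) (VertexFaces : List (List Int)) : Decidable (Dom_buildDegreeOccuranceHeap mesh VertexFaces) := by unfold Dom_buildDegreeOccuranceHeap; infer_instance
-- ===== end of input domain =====

-- B replaces A's dict-accumulation grouping by a direct per-degree construction
-- (sorted distinct degrees, one filter per degree); objective: simpler, not faster.

-- ===== PORT A =====
def buildDegreeOccuranceHeap (mesh : List Int) (VertexFaces : List (List Int)) : List (Int × Int × List Int) :=
  let degreeMap : PySem.Dict Int (List Int) :=
    (PySem.List.enumerate VertexFaces 0).foldl (fun dm p =>
      let degree : Int := p.2.length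
      let dm := if !(PySem.Dict.contains dm degree) then PySem.Dict.insert dm degree [] else dm
      PySem.Dict.modify dm degree [] (fun v => v ++ [p.1]))
      PySem.Dict.empty
  let occursHeap : List (Int × Int × List Int) :=
    (PySem.Dict.items degreeMap).foldl (fun acc q => acc ++ [((q.2.length : Int), q.1, q.2)]) []
  PySem.List.sorted2 occursHeap (fun t => t.1) (fun t => t.2.1) false

-- ===== PORT B =====
def buildDegreeOccuranceHeap_alt (mesh : List Int) (VertexFaces : List (List Int)) : List (Int × Int × List Int) :=
  let degrees : List Int :=
    PySem.List.sorted (PySem.Set.ofList (VertexFaces.map (fun f => (f.length : Int)))) (fun d => d) false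
  let heap : List (Int × Int × List Int) :=
    degrees.map (fun d =>
      (((VertexFaces.filter (fun f => (f.length : Int) == d)).length : Int), d,
       ((PySem.List.enumerate VertexFaces 0).filter (fun p => (p.2.length : Int) == d)).map (fun p => p.1)))
  PySem.List.sorted2 heap (fun t => t.1) (fun t => t.2.1) false

-- ===== PRECONDITION & SPEC =====
def Spec_buildDegreeOccuranceHeap (mesh : List Int) (VertexFaces : List (List Int)) (out : List (Int × Int × List Int)) : Prop := out = buildDegreeOccuranceHeap_alt mesh VertexFaces
instance (mesh : List Int) (VertexFaces : List (List Int)) (out : List (Int × Int × List Int)) : Decidable (Spec_buildDegreeOccuranceHeap mesh VertexFaces out) := by unfold Spec_buildDegreeOccuranceHeap; infer_instance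

-- ===== CLAIM (what is proved, stated in full; the proofs are below) =====
def Claim_equal_buildDegreeOccuranceHeap : Prop := ∀ (mesh : List Int) (VertexFaces : List (List Int)), Dom_buildDegreeOccuranceHeap mesh VertexFaces → Spec_buildDegreeOccuranceHeap mesh VertexFaces (buildDegreeOccuranceHeap mesh VertexFaces)

-- ===== LEMMAS AND PROOFS =====

-- sorted2 is insertion sort by the lexicographic combination of its two keys
theorem sorted2_eq_sorted_toLex {α : Type} (xs : List α) (k1 k2 : α → Int) :
    PySem.List.sorted2 xs k1 k2 false
      = PySem.List.sorted xs (fun x => toLex (k1 x, k2 x)) false := by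
  unfold PySem.List.sorted2 PySem.List.sorted
  simp only [if_neg (by decide : ¬ (false = true))]
  have hb : (fun a b => decide (k1 a < k1 b) || (!decide (k1 b < k1 a) && decide (k2 a < k2 b)))
      = (fun a b => decide ((toLex (k1 a, k2 a)) < toLex (k1 b, k2 b))) := by
    funext a b
    simp only [Prod.Lex.toLex_lt_toLex]
    rcases lt_trichotomy (k1 a) (k1 b) with h|h|h
    · simp [h, not_lt.2 h.le]
    · simp [h]
    · simp [h, not_lt.2 h.le]
      intro he; exact absurd he (ne_of_gt h)
  rw [hb]

-- sorting a permutation under a key that is duplicate-free on the list gives the same list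
theorem sorted_eq_sorted_of_perm_of_nodup_map {α κ : Type} [LinearOrder κ]
    (xs ys : List α) (key : α → κ) (hperm : xs.Perm ys) (hnd : (xs.map key).Nodup) :
    PySem.List.sorted xs key false = PySem.List.sorted ys key false := by
  have hp : (PySem.List.sorted xs key false).Perm xs := PySem.List.sorted_perm xs key false
  have hle : (PySem.List.sorted xs key false).Pairwise (fun a b => key a ≤ key b) :=
    PySem.List.sorted_pairwise xs key
  have hz : ((PySem.List.sorted xs key false).map key).Nodup :=
    ((hp.map key).nodup_iff).mpr hnd
  have hne : (PySem.List.sorted xs key false).Pairwise (fun a b => key a ≠ key b) := by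
    rw [List.Nodup, List.pairwise_map] at hz; exact hz
  have hlt : (PySem.List.sorted xs key false).Pairwise (fun a b => key a < key b) :=
    (hle.and hne).imp (fun h => lt_of_le_of_ne h.1 h.2)
  rw [PySem.List.sorted_eq_of_perm_of_pairwise_lt xs _ key hp hlt,
      PySem.List.sorted_eq_of_perm_of_pairwise_lt ys _ key (hp.trans hperm) hlt]

-- A's dict loop body collapses to a single modify
theorem dict_body_eq (dm : PySem.Dict Int (List Int)) (d : Int) (i : Int) :
    PySem.Dict.modify (if !(PySem.Dict.contains dm d) then PySem.Dict.insert dm d [] else dm) d [] (fun v => v ++ [i])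
      = PySem.Dict.modify dm d [] (fun v => v ++ [i]) := by
  by_cases h : PySem.Dict.contains dm d = true
  · simp [h]
  · simp only [Bool.not_eq_true] at h
    simp only [h, Bool.not_false, if_pos]
    unfold PySem.Dict.modify
    rw [PySem.Dict.getD_insert_self, PySem.Dict.insert_insert_self,
        PySem.Dict.getD_of_not_contains dm [] h]

-- A's pre-sort heap is a map over the first-occurrence-ordered distinct degrees
theorem heapA_eq (VertexFaces : List (List Int)) :
    ((PySem.Dict.items ((PySem.List.enumerate VertexFaces 0).foldl (fun dm p =>
        let degree : Int := p.2.length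
        let dm := if !(PySem.Dict.contains dm degree) then PySem.Dict.insert dm degree [] else dm
        PySem.Dict.modify dm degree [] (fun v => v ++ [p.1]))
        PySem.Dict.empty)).foldl (fun acc q => acc ++ [((q.2.length : Int), q.1, q.2)]) [])
      = (PySem.Set.ofList (VertexFaces.map (fun f => (f.length : Int)))).map (fun d =>
          (((VertexFaces.filter (fun f => (f.length : Int) == d)).length : Int), d,
           ((PySem.List.enumerate VertexFaces 0).filter (fun p => (p.2.length : Int) == d)).map (fun p => p.1))) := by
  have hbody : ((PySem.List.enumerate VertexFaces 0).foldl (fun dm p =>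
        let degree : Int := p.2.length
        let dm := if !(PySem.Dict.contains dm degree) then PySem.Dict.insert dm degree [] else dm
        PySem.Dict.modify dm degree [] (fun v => v ++ [p.1]))
        PySem.Dict.empty)
      = (((PySem.List.enumerate VertexFaces 0).map (fun p => ((p.2.length : Int), p.1))).foldl
          (fun dm q => PySem.Dict.modify dm q.1 [] (fun v => v ++ [q.2])) PySem.Dict.empty) := by
    rw [List.foldl_map]
    congr 1
    funext dm p
    exact dict_body_eq dm _ _
  rw [hbody]
  set e := PySem.List.enumerate VertexFaces 0 with he
  set l := e.map (fun p => ((p.2.length : Int), p.1)) with hl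
  set D := l.foldl (fun dm q => PySem.Dict.modify dm q.1 [] (fun v => v ++ [q.2])) PySem.Dict.empty with hD
  have hnd : D.keys.Nodup := by
    rw [hD]
    exact PySem.Dict.nodup_keys_foldl_modify_key l (fun q => q.1) []
      (fun dm q => fun v => v ++ [q.2]) PySem.Dict.empty (by simp)
  have hdegs : l.map (fun q => q.1) = VertexFaces.map (fun f => (f.length : Int)) := by
    rw [hl, List.map_map]
    conv_rhs => rw [← PySem.List.map_snd_enumerate VertexFaces 0, List.map_map]
    simp only [Function.comp_def]
    rw [← he]
  have hkeys : D.keys = PySem.Set.ofList (VertexFaces.map (fun f => (f.length : Int))) := by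
    rw [hD, PySem.Dict.keys_foldl_modify_key l (fun q => q.1) []
      (fun dm q => fun v => v ++ [q.2]) PySem.Dict.empty, hdegs]
    simp [PySem.Set.update, PySem.Set.ofList]
  have hget : ∀ c : Int, D.getD c []
      = (e.filter (fun p => ((p.2.length : Int) == c))).map (fun p => p.1) := by
    intro c
    rw [hD, PySem.Dict.getD_foldl_modify_append l PySem.Dict.empty c, hl,
      List.filter_map, List.map_map]
    simp [Function.comp_def]
  rw [PySem.List.foldl_append_singleton_eq_map, PySem.Dict.items_eq_map_keys D hnd [],
    List.map_map, hkeys]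
  refine List.map_congr_left ?_
  intro d hd
  simp only [Function.comp]
  rw [hget d]
  have hflt : VertexFaces.filter (fun f => (f.length : Int) == d)
      = (e.filter (fun p => ((p.2.length : Int) == d))).map (fun p => p.2) := by
    conv_lhs => rw [← PySem.List.map_snd_enumerate VertexFaces 0, List.filter_map]
    simp only [Function.comp_def]
    rw [← he]
  simp [hflt]

-- ===== VERDICT (by name: the statement is the Claim_ definition above) =====
theorem buildDegreeOccuranceHeap_spec : Claim_equal_buildDegreeOccuranceHeap := by
  intro mesh VertexFaces _
  unfold Spec_buildDegreeOccuranceHeap buildDegreeOccuranceHeap buildDegreeOccuranceHeap_alt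
  simp only [heapA_eq]
  rw [sorted2_eq_sorted_toLex, sorted2_eq_sorted_toLex]
  apply sorted_eq_sorted_of_perm_of_nodup_map
  · exact ((PySem.List.sorted_perm _ _ _).map _).symm
  · rw [List.map_map]
    refine List.Nodup.map ?_ (PySem.Set.nodup_ofList _)
    intro d d' h
    simpa using congrArg (fun x => (ofLex x).2) h
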